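-- pv_equiv track=rewrite | github.com/sweettuse/pyaoc | pyaoc2016/aoc13.py | part2
-- ===== SOURCE A (Python) =====
-- from queue import Queue
--
-- FAV_NUM = 1358
--
-- def is_open(x, y, fav_num=FAV_NUM):
--     n = fav_num + x * x + 3 * x + 2 * x * y + y + y * y
--     return not bin(n).count('1') % 2
--
-- def part2(fav_num=FAV_NUM):
--     q = Queue()
--     start = 1, 1
--     q.put((0, start))
--     seen = {start}
--
--     def _get_surrounding(x, y):
--         for xo, yo in (1, 0), (-1, 0), (0, 1), (0, -1):
--             xy = x + xo, y + yo
--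
--             if xy not in seen and xy[0] >= 0 and xy[1] >= 0 and is_open(*xy, fav_num):
--                 seen.add(xy)
--                 yield xy
--
--     while not q.empty():
--         level, xy = q.get()
--         level += 1
--         if level > 50:
--             continue
--         for xy_new in _get_surrounding(*xy):
--             q.put((level, xy_new))
--     return len(seen)
-- ===== SOURCE B (Python) =====
-- FAV_NUM = 1358
--
-- def is_open(x, y, fav_num=FAV_NUM):
--     n = fav_num + x * x + 3 * x + 2 * x * y + y + y * y
--     return not bin(n).count('1') % 2
--
-- def part2(fav_num=FAV_NUM):
--     start = (1, 1)
--     seen = {start}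
--     frontier = {start}
--     for _ in range(50):
--         next_frontier = set()
--         for x, y in frontier:
--             for xy in ((x + 1, y), (x - 1, y), (x, y + 1), (x, y - 1)):
--                 if xy not in seen and xy[0] >= 0 and xy[1] >= 0 and is_open(*xy, fav_num):
--                     seen.add(xy)
--                     next_frontier.add(xy)
--         frontier = next_frontier
--     return len(seen)
-- ===== Notes on version B (the rewrite author's own statement) =====
-- stated objective: simpler
-- what changed: Replaced the distance-labelled FIFO-queue BFS (queue of (level,cell) pairs with a continue-guard past the step limit and a mutating generator) by a level-synchronous BFS: one iteration per distance level up to the step limit, each expanding the whole current frontier set into the next; no per-node levels and no queue.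
import Mathlib
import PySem

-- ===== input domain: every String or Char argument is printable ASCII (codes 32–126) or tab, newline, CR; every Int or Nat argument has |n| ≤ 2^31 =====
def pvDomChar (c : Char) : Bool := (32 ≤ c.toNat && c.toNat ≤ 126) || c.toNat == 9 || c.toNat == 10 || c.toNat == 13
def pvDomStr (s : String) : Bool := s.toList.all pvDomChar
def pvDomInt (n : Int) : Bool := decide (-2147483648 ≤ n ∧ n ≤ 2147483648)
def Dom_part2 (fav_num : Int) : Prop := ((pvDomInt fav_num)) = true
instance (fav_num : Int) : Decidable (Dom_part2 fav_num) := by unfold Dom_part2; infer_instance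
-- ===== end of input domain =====

-- B replaces A's distance-labelled queue BFS by a level-synchronous frontier expansion (50 rounds); same count of reachable cells.

-- ===== PORT A =====
-- is_open(x, y, fav_num): bin(n).count('1') is PySem.Int.bitCount (reads |n|, as Python's bin does)
def isOpen (fav x y : Int) : Bool :=
  decide (PySem.Int.bitCount (fav + x * x + 3 * x + 2 * x * y + y + y * y) % 2 = 0)

-- the offset tuple (1, 0), (-1, 0), (0, 1), (0, -1)
def neighOffs : List (Int × Int) := [(1, 0), (-1, 0), (0, 1), (0, -1)]

-- one step of the generator _get_surrounding: test one offset, mutate seen, collect the yield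
def surStep (fav x y : Int) (st : PySem.Set (Int × Int) × List (Int × Int)) (o : Int × Int) :
    PySem.Set (Int × Int) × List (Int × Int) :=
  let p := (x + o.1, y + o.2)
  if !st.1.contains p && decide (p.1 ≥ 0) && decide (p.2 ≥ 0) && isOpen fav p.1 p.2 then
    (st.1.add p, st.2 ++ [p])
  else st

-- _get_surrounding(x, y): returns (updated seen, list of yielded cells)
def getSurrounding (fav x y : Int) (seen : PySem.Set (Int × Int)) :
    PySem.Set (Int × Int) × List (Int × Int) :=
  neighOffs.foldl (surStep fav x y) (seen, [])

theorem surStep_snd_len (fav x y : Int) (st : PySem.Set (Int × Int) × List (Int × Int))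
    (o : Int × Int) : (surStep fav x y st o).2.length ≤ st.2.length + 1 := by
  unfold surStep
  dsimp only
  split <;> simp

theorem foldl_surStep_len (fav x y : Int) (offs : List (Int × Int)) :
    ∀ st : PySem.Set (Int × Int) × List (Int × Int),
      (offs.foldl (surStep fav x y) st).2.length ≤ st.2.length + offs.length := by
  induction offs with
  | nil => intro st; simp
  | cons o offs ih =>
    intro st
    have h1 := surStep_snd_len fav x y st o
    have h2 := ih (surStep fav x y st o)
    simp only [List.foldl_cons, List.length_cons]
    omega

theorem getSurrounding_len (fav x y : Int) (seen : PySem.Set (Int × Int)) :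
    (getSurrounding fav x y seen).2.length ≤ 4 := by
  have := foldl_surStep_len fav x y neighOffs (seen, [])
  simpa [neighOffs] using this

-- the while loop over the queue of (level, (x, y)) entries
def loopA (fav : Int) : List (Int × (Int × Int)) → PySem.Set (Int × Int) → PySem.Set (Int × Int)
  | [], seen => seen
  | (level, xy) :: q, seen =>
    if level + 1 > 50 then loopA fav q seen
    else
      loopA fav (q ++ (getSurrounding fav xy.1 xy.2 seen).2.map (fun p => (level + 1, p)))
        (getSurrounding fav xy.1 xy.2 seen).1
termination_by q _ => (q.map (fun e => 5 ^ ((50 : Int) - e.1).toNat)).sum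
decreasing_by
  · have : 0 < 5 ^ ((50 : Int) - level).toNat := by positivity
    simp only [List.map_cons, List.sum_cons]
    omega
  · rename_i hle
    have hlen := getSurrounding_len fav xy.1 xy.2 seen
    have hlev : ((50 : Int) - level).toNat = ((50 : Int) - (level + 1)).toNat + 1 := by omega
    simp only [List.map_cons, List.sum_cons, List.map_append, List.sum_append, List.map_map]
    have hconst : (((getSurrounding fav xy.1 xy.2 seen).2.map
        ((fun e => 5 ^ ((50 : Int) - e.1).toNat) ∘ fun p => (level + 1, p))).sum)
        = (getSurrounding fav xy.1 xy.2 seen).2.length * 5 ^ ((50 : Int) - (level + 1)).toNat := by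
      simp [Function.comp_def, List.map_const', List.sum_replicate, smul_eq_mul]
    rw [hconst, hlev, pow_succ]
    have h5 : 0 < 5 ^ ((50 : Int) - (level + 1)).toNat := by positivity
    nlinarith

def part2 (fav_num : Int) : Int :=
  (loopA fav_num [((0 : Int), ((1 : Int), (1 : Int)))]
    (PySem.Set.ofList [((1 : Int), (1 : Int))])).length

-- ===== PORT B =====
-- body of B's innermost loop: one neighbour offset of one frontier cell; state = (seen, next_frontier)
def bStep (fav : Int) (xy : Int × Int) (a : PySem.Set (Int × Int) × PySem.Set (Int × Int))
    (o : Int × Int) : PySem.Set (Int × Int) × PySem.Set (Int × Int) :=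
  let p := (xy.1 + o.1, xy.2 + o.2)
  if !a.1.contains p && decide (p.1 ≥ 0) && decide (p.2 ≥ 0) && isOpen fav p.1 p.2 then
    (a.1.add p, a.2.add p)
  else a

-- inner loop of B: one frontier cell, the four neighbours
def bCell (fav : Int) (acc : PySem.Set (Int × Int) × PySem.Set (Int × Int)) (xy : Int × Int) :
    PySem.Set (Int × Int) × PySem.Set (Int × Int) :=
  neighOffs.foldl (bStep fav xy) acc

-- body of 'for _ in range(50)': expand the whole frontier
def bLevel (fav : Int) (st : PySem.Set (Int × Int) × PySem.Set (Int × Int)) :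
    PySem.Set (Int × Int) × PySem.Set (Int × Int) :=
  st.2.foldl (bCell fav) (st.1, (PySem.Set.empty : PySem.Set (Int × Int)))

def part2_alt (fav_num : Int) : Int :=
  ((PySem.List.pyRange 0 50 1).foldl (fun st _ => bLevel fav_num st)
    (PySem.Set.ofList [((1 : Int), (1 : Int))], PySem.Set.ofList [((1 : Int), (1 : Int))])).1.length

-- ===== PRECONDITION & SPEC =====
def Spec_part2 (fav_num : Int) (out : Int) : Prop := out = part2_alt fav_num
instance (fav_num : Int) (out : Int) : Decidable (Spec_part2 fav_num out) := by unfold Spec_part2; infer_instance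

-- ===== CLAIM (what is proved, stated in full; the proofs are below) =====
def Claim_equal_part2 : Prop := ∀ (fav_num : Int), Dom_part2 fav_num → Spec_part2 fav_num (part2 fav_num)

-- ===== LEMMAS AND PROOFS =====

-- proof-side: one whole-level expansion, A's shape (collect yielded cells in a list)
def expandStep (fav : Int) (st : PySem.Set (Int × Int) × List (Int × Int)) (xy : Int × Int) :
    PySem.Set (Int × Int) × List (Int × Int) :=
  ((getSurrounding fav xy.1 xy.2 st.1).1, st.2 ++ (getSurrounding fav xy.1 xy.2 st.1).2)

def expand (fav : Int) (seen : PySem.Set (Int × Int)) (front : List (Int × Int)) :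
    PySem.Set (Int × Int) × List (Int × Int) :=
  front.foldl (expandStep fav) (seen, [])

def levels (fav : Int) : Nat → PySem.Set (Int × Int) → List (Int × Int) → PySem.Set (Int × Int)
  | 0, seen, _ => seen
  | k + 1, seen, front => levels fav k (expand fav seen front).1 (expand fav seen front).2

-- generic accumulator-append law for folds whose step appends to the second component
theorem foldl_acc_append {α γ β : Type} (f : γ × List β → α → γ × List β)
    (hf : ∀ s acc x, (f (s, acc) x).1 = (f (s, []) x).1 ∧ (f (s, acc) x).2 = acc ++ (f (s, []) x).2) :
    ∀ (l : List α) (s : γ) (acc : List β),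
      l.foldl f (s, acc) = ((l.foldl f (s, [])).1, acc ++ (l.foldl f (s, [])).2) := by
  intro l
  induction l with
  | nil => intro s acc; simp
  | cons x l ih =>
    intro s acc
    simp only [List.foldl_cons]
    obtain ⟨h1, h2⟩ := hf s acc x
    rw [show f (s, acc) x = ((f (s, []) x).1, acc ++ (f (s, []) x).2) from Prod.ext h1 h2]
    rw [ih (f (s, []) x).1 (acc ++ (f (s, []) x).2),
        ih (f (s, []) x).1 (f (s, []) x).2]
    simp

theorem surStep_acc (fav x y : Int) : ∀ (s : PySem.Set (Int × Int)) (acc : List (Int × Int))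
    (o : Int × Int), (surStep fav x y (s, acc) o).1 = (surStep fav x y (s, []) o).1 ∧
      (surStep fav x y (s, acc) o).2 = acc ++ (surStep fav x y (s, []) o).2 := by
  intro s acc o
  unfold surStep
  dsimp only
  split <;> simp

theorem expandStep_acc (fav : Int) : ∀ (s : PySem.Set (Int × Int)) (acc : List (Int × Int))
    (xy : Int × Int), (expandStep fav (s, acc) xy).1 = (expandStep fav (s, []) xy).1 ∧
      (expandStep fav (s, acc) xy).2 = acc ++ (expandStep fav (s, []) xy).2 := by
  intro s acc xy
  unfold expandStep
  simp

theorem foldl_surStep_acc (fav x y : Int) (offs : List (Int × Int)) (s : PySem.Set (Int × Int))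
    (acc : List (Int × Int)) :
    offs.foldl (surStep fav x y) (s, acc)
      = ((offs.foldl (surStep fav x y) (s, [])).1, acc ++ (offs.foldl (surStep fav x y) (s, [])).2) :=
  foldl_acc_append _ (surStep_acc fav x y) offs s acc

theorem foldl_expandStep_acc (fav : Int) (front : List (Int × Int)) (s : PySem.Set (Int × Int))
    (acc : List (Int × Int)) :
    front.foldl (expandStep fav) (s, acc)
      = ((expand fav s front).1, acc ++ (expand fav s front).2) :=
  foldl_acc_append _ (expandStep_acc fav) front s acc

theorem surStep_mono (fav x y : Int) (st : PySem.Set (Int × Int) × List (Int × Int))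
    (o : Int × Int) (q : Int × Int) (h : q ∈ st.1) : q ∈ (surStep fav x y st o).1 := by
  unfold surStep; dsimp only
  split
  · exact (PySem.Set.mem_add _ _ _).mpr (Or.inl h)
  · exact h

theorem surStep_inv (fav x y : Int) (st : PySem.Set (Int × Int) × List (Int × Int))
    (o : Int × Int) (h : ∀ q ∈ st.2, q ∈ st.1) :
    ∀ q ∈ (surStep fav x y st o).2, q ∈ (surStep fav x y st o).1 := by
  unfold surStep; dsimp only
  split
  · intro q hq
    rcases List.mem_append.mp hq with hq | hq
    · exact (PySem.Set.mem_add _ _ _).mpr (Or.inl (h q hq))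
    · exact (PySem.Set.mem_add _ _ _).mpr (Or.inr (List.mem_singleton.mp hq))
  · exact h

theorem foldl_surStep_mono (fav x y : Int) (offs : List (Int × Int)) :
    ∀ (st : PySem.Set (Int × Int) × List (Int × Int)) (q : Int × Int), q ∈ st.1 →
      q ∈ (offs.foldl (surStep fav x y) st).1 := by
  induction offs with
  | nil => exact fun st q h => h
  | cons o offs ih =>
    intro st q h
    exact ih _ q (surStep_mono fav x y st o q h)

theorem foldl_surStep_inv (fav x y : Int) (offs : List (Int × Int)) :
    ∀ (st : PySem.Set (Int × Int) × List (Int × Int)), (∀ q ∈ st.2, q ∈ st.1) →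
      ∀ q ∈ (offs.foldl (surStep fav x y) st).2, q ∈ (offs.foldl (surStep fav x y) st).1 := by
  induction offs with
  | nil => exact fun st h => h
  | cons o offs ih =>
    intro st h
    exact ih _ (surStep_inv fav x y st o h)

-- head-application forms of the two step functions
theorem bStep_apply (fav : Int) (xy : Int × Int) (s nf : PySem.Set (Int × Int)) (o : Int × Int) :
    bStep fav xy (s, nf) o
      = if (!s.contains (xy.1 + o.1, xy.2 + o.2) && decide (xy.1 + o.1 ≥ 0)
            && decide (xy.2 + o.2 ≥ 0) && isOpen fav (xy.1 + o.1) (xy.2 + o.2)) = true then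
          (s.add (xy.1 + o.1, xy.2 + o.2), nf.add (xy.1 + o.1, xy.2 + o.2))
        else (s, nf) := rfl

theorem surStep_apply (fav x y : Int) (s : PySem.Set (Int × Int)) (acc : List (Int × Int))
    (o : Int × Int) :
    surStep fav x y (s, acc) o
      = if (!s.contains (x + o.1, y + o.2) && decide (x + o.1 ≥ 0)
            && decide (y + o.2 ≥ 0) && isOpen fav (x + o.1) (y + o.2)) = true then
          (s.add (x + o.1, y + o.2), acc ++ [(x + o.1, y + o.2)])
        else (s, acc) := rfl

-- B's inner four-neighbour loop equals A's generator run from the same seen, appending to next_frontier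
theorem bCell_eq_sur (fav : Int) (xy : Int × Int) (offs : List (Int × Int)) :
    ∀ (s nf : PySem.Set (Int × Int)), (∀ q ∈ nf, q ∈ s) →
      offs.foldl (bStep fav xy) (s, nf)
        = ((offs.foldl (surStep fav xy.1 xy.2) (s, [])).1,
           nf ++ (offs.foldl (surStep fav xy.1 xy.2) (s, [])).2) := by
  induction offs with
  | nil => intro s nf _; simp
  | cons o offs ih =>
    intro s nf h
    simp only [List.foldl_cons, bStep_apply, surStep_apply]
    by_cases hc : (!s.contains (xy.1 + o.1, xy.2 + o.2) && decide (xy.1 + o.1 ≥ 0)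
        && decide (xy.2 + o.2 ≥ 0) && isOpen fav (xy.1 + o.1) (xy.2 + o.2)) = true
    · rw [if_pos hc, if_pos hc]
      have hcf : s.contains (xy.1 + o.1, xy.2 + o.2) = false := by
        have hc' := hc
        simp only [Bool.and_eq_true, Bool.not_eq_true'] at hc'
        exact hc'.1.1.1
      have hps : (xy.1 + o.1, xy.2 + o.2) ∉ s := fun hm => by
        rw [(PySem.Set.contains_iff _ _).mpr hm] at hcf
        simp at hcf
      have hpn : (xy.1 + o.1, xy.2 + o.2) ∉ nf := fun hm => hps (h _ hm)
      rw [PySem.Set.add_of_not_mem hpn]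
      have hinv : ∀ q ∈ nf ++ [(xy.1 + o.1, xy.2 + o.2)],
          q ∈ s.add (xy.1 + o.1, xy.2 + o.2) := by
        intro q hq
        rcases List.mem_append.mp hq with hq | hq
        · exact (PySem.Set.mem_add _ _ _).mpr (Or.inl (h q hq))
        · exact (PySem.Set.mem_add _ _ _).mpr (Or.inr (List.mem_singleton.mp hq))
      rw [ih _ _ hinv,
          foldl_surStep_acc fav xy.1 xy.2 offs (s.add (xy.1 + o.1, xy.2 + o.2))
            ([] ++ [(xy.1 + o.1, xy.2 + o.2)])]
      simp
    · rw [if_neg hc, if_neg hc]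
      exact ih s nf h

-- a whole B level equals A-shaped expansion of the frontier
theorem bLevel_eq_expand (fav : Int) (front : List (Int × Int)) :
    ∀ (s nf : PySem.Set (Int × Int)), (∀ q ∈ nf, q ∈ s) →
      front.foldl (bCell fav) (s, nf) = ((expand fav s front).1, nf ++ (expand fav s front).2) := by
  induction front with
  | nil => intro s nf _; simp [expand]
  | cons xy front ih =>
    intro s nf h
    simp only [List.foldl_cons]
    have hbc : bCell fav (s, nf) xy
        = ((getSurrounding fav xy.1 xy.2 s).1, nf ++ (getSurrounding fav xy.1 xy.2 s).2) := by
      unfold bCell getSurrounding; exact bCell_eq_sur fav xy neighOffs s nf h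
    rw [hbc]
    have hinv : ∀ q ∈ nf ++ (getSurrounding fav xy.1 xy.2 s).2,
        q ∈ (getSurrounding fav xy.1 xy.2 s).1 := by
      intro q hq
      rcases List.mem_append.mp hq with hq | hq
      · exact foldl_surStep_mono fav xy.1 xy.2 neighOffs (s, []) q (h q hq)
      · exact foldl_surStep_inv fav xy.1 xy.2 neighOffs (s, []) (by simp) q hq
    rw [ih _ _ hinv]
    show _ = ((expand fav s (xy :: front)).1, nf ++ (expand fav s (xy :: front)).2)
    have hexp : expand fav s (xy :: front)
        = ((expand fav (getSurrounding fav xy.1 xy.2 s).1 front).1,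
           (getSurrounding fav xy.1 xy.2 s).2
             ++ (expand fav (getSurrounding fav xy.1 xy.2 s).1 front).2) := by
      unfold expand
      simp only [List.foldl_cons]
      rw [show expandStep fav (s, []) xy
          = ((getSurrounding fav xy.1 xy.2 s).1, (getSurrounding fav xy.1 xy.2 s).2) from by
        unfold expandStep; simp]
      exact foldl_expandStep_acc fav front (getSurrounding fav xy.1 xy.2 s).1 _
    rw [hexp]
    simp

theorem bLevel_expand (fav : Int) (s f : PySem.Set (Int × Int)) :
    bLevel fav (s, f) = ((expand fav s f).1, (expand fav s f).2) := by
  unfold bLevel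
  have := bLevel_eq_expand fav f s (PySem.Set.empty) (by intro q hq; simp [PySem.Set.empty] at hq)
  simpa [PySem.Set.empty] using this

-- A's queue loop returns seen unchanged once every entry sits at level ≥ 50
theorem loopA_skip (fav : Int) : ∀ (q : List (Int × (Int × Int))) (seen : PySem.Set (Int × Int)),
    (∀ e ∈ q, (50 : Int) ≤ e.1) → loopA fav q seen = seen := by
  intro q
  induction q with
  | nil => intro seen _; rw [loopA]
  | cons e q ih =>
    intro seen h
    obtain ⟨l, xy⟩ := e
    rw [loopA]
    have hl : (50 : Int) ≤ l := h (l, xy) List.mem_cons_self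
    rw [if_pos (by omega)]
    exact ih seen fun e he => h e (List.mem_cons_of_mem _ he)

def rhs (fav : Int) : Nat → List (Int × Int) → List (Int × Int) → PySem.Set (Int × Int) →
    PySem.Set (Int × Int)
  | 0, _, _, seen => seen
  | k + 1, cur, next, seen =>
    levels fav k (expand fav seen cur).1 (next ++ (expand fav seen cur).2)

theorem rhs_nil (fav : Int) (k : Nat) (next : List (Int × Int)) (seen : PySem.Set (Int × Int)) :
    rhs fav k next [] seen = levels fav k seen next := by
  cases k <;> simp [rhs, levels, expand]

-- the queue always consists of the current level's cells followed by the next level's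
theorem loopA_levels (fav : Int) : ∀ (k : Nat), k ≤ 50 →
    ∀ (cur next : List (Int × Int)) (seen : PySem.Set (Int × Int)),
      loopA fav (cur.map (fun p => ((50 - (k : Int)), p))
          ++ next.map (fun p => ((51 - (k : Int)), p))) seen
        = rhs fav k cur next seen := by
  intro k
  induction k with
  | zero =>
    intro _ cur next seen
    show loopA fav _ _ = seen
    apply loopA_skip
    intro e he
    rcases List.mem_append.mp he with he | he <;>
      · obtain ⟨p, _, hp⟩ := List.mem_map.mp he
        rw [← hp]
        norm_num
  | succ k ihk =>
    intro hk cur next seen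
    induction cur generalizing next seen with
    | nil =>
      have hcast : (51 : Int) - ((k + 1 : Nat) : Int) = 50 - (k : Int) := by push_cast; ring
      have := ihk (by omega) next [] seen
      simp only [List.map_nil, List.nil_append, List.append_nil] at this ⊢

      simp only [hcast] at this ⊢
      rw [this, rhs_nil]
      simp [rhs, expand]
    | cons p cur ihc =>
      simp only [List.map_cons, List.cons_append]
      rw [loopA]
      have hlev : ¬ ((50 : Int) - ((k + 1 : Nat) : Int) + 1 > 50) := by push_cast; omega
      rw [if_neg hlev]
      have hmap : (cur.map (fun p => ((50 : Int) - ((k + 1 : Nat) : Int), p))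
            ++ next.map (fun p => ((51 : Int) - ((k + 1 : Nat) : Int), p)))
            ++ (getSurrounding fav p.1 p.2 seen).2.map
              (fun q => ((50 : Int) - ((k + 1 : Nat) : Int) + 1, q))
          = cur.map (fun p => ((50 : Int) - ((k + 1 : Nat) : Int), p))
            ++ (next ++ (getSurrounding fav p.1 p.2 seen).2).map
              (fun q => ((51 : Int) - ((k + 1 : Nat) : Int), q)) := by
        have h51 : (50 : Int) - ((k + 1 : Nat) : Int) + 1 = 51 - ((k + 1 : Nat) : Int) := by ring
        simp only [h51, List.map_append, List.append_assoc]
      rw [hmap, ihc]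
      show rhs fav (k + 1) cur (next ++ (getSurrounding fav p.1 p.2 seen).2)
            (getSurrounding fav p.1 p.2 seen).1
          = rhs fav (k + 1) (p :: cur) next seen
      have hexp : expand fav seen (p :: cur)
          = ((expand fav (getSurrounding fav p.1 p.2 seen).1 cur).1,
             (getSurrounding fav p.1 p.2 seen).2
               ++ (expand fav (getSurrounding fav p.1 p.2 seen).1 cur).2) := by
        unfold expand
        simp only [List.foldl_cons]
        rw [show expandStep fav (seen, []) p
            = ((getSurrounding fav p.1 p.2 seen).1, (getSurrounding fav p.1 p.2 seen).2) from by
          unfold expandStep; simp]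
        exact foldl_expandStep_acc fav cur (getSurrounding fav p.1 p.2 seen).1 _
      simp [rhs, hexp, List.append_assoc]

theorem part2_eq_levels (fav : Int) :
    part2 fav = ((levels fav 50 (PySem.Set.ofList [((1 : Int), (1 : Int))])
      [((1 : Int), (1 : Int))]).length : Int) := by
  unfold part2
  have h := loopA_levels fav 50 (le_refl 50) [((1 : Int), (1 : Int))] []
    (PySem.Set.ofList [((1 : Int), (1 : Int))])
  norm_num at h
  rw [h, rhs_nil]

theorem foldl_const_iterate {α β : Type} (g : β → β) :
    ∀ (l : List α) (st : β), l.foldl (fun s _ => g s) st = g^[l.length] st := by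
  intro l
  induction l with
  | nil => intro st; rfl
  | cons x l ih =>
    intro st
    simp only [List.foldl_cons, List.length_cons]
    rw [ih (g st), Function.iterate_succ_apply]

theorem iterate_bLevel (fav : Int) : ∀ (k : Nat) (s f : PySem.Set (Int × Int)),
    ((bLevel fav)^[k] (s, f)).1 = levels fav k s f := by
  intro k
  induction k with
  | zero => intro s f; rfl
  | succ k ih =>
    intro s f
    rw [Function.iterate_succ_apply, bLevel_expand, ih]
    simp [levels]

theorem part2_alt_eq_levels (fav : Int) :
    part2_alt fav = ((levels fav 50 (PySem.Set.ofList [((1 : Int), (1 : Int))])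
      [((1 : Int), (1 : Int))]).length : Int) := by
  unfold part2_alt
  rw [foldl_const_iterate (bLevel fav)]
  rw [show (PySem.List.pyRange 0 50 1).length = 50 by decide]
  rw [show (PySem.Set.ofList [((1 : Int), (1 : Int))], PySem.Set.ofList [((1 : Int), (1 : Int))])
      = ((PySem.Set.ofList [((1 : Int), (1 : Int))] : PySem.Set (Int × Int)),
         (PySem.Set.ofList [((1 : Int), (1 : Int))] : PySem.Set (Int × Int))) from rfl]
  rw [iterate_bLevel]
  rfl

-- ===== VERDICT (by name: the statement is the Claim_ definition above) =====
theorem part2_spec : Claim_equal_part2 := by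
  intro fav _
  unfold Spec_part2
  rw [part2_eq_levels, part2_alt_eq_levels]
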